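-- pv_equiv track=rewrite | github.com/AnonymousAuthor2013/CSDMetalearningRS | DataPrepare/TopcoderDataSet.py | indexDataPoint
-- ===== SOURCE A (Python) =====
-- def indexDataPoint(taskids):
--     id=taskids[0]
--     IDIndex=[(id,0)]
--     for i in range(1,len(taskids)):
--         if taskids[i]!=id:
--             id=taskids[i]
--             IDIndex.append((id,i))
--     return IDIndex
-- ===== SOURCE B (Python) =====
-- def indexDataPoint(taskids):
--     # Run-skipping scan: jump from the start of one run of equal ids to the next,
--     # recording (id, start_index) per run. Returns [] on empty input (A raises there).
--     IDIndex = []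
--     i = 0
--     n = len(taskids)
--     while i < n:
--         IDIndex.append((taskids[i], i))
--         j = i + 1
--         while j < n and taskids[j] == taskids[i]:
--             j += 1
--         i = j
--     return IDIndex
-- ===== Notes on version B (the rewrite author's own statement) =====
-- stated objective: alternative
-- what changed: B iterates over consecutive runs of equal ids (skipping each run with an inner scan and a cumulative start offset) instead of A's element-by-element loop with a tracked current id.
import Mathlib
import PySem

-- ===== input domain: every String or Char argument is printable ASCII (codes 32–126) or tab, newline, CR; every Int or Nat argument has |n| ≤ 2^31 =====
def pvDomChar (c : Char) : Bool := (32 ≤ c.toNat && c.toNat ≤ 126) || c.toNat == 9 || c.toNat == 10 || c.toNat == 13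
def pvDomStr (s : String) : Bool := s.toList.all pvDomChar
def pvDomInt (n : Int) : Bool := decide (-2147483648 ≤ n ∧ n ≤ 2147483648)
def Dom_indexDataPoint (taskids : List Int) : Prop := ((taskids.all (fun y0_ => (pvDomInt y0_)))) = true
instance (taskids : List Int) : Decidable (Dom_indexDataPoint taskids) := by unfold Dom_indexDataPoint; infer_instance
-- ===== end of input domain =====

-- B replaces A's element-by-element loop (tracked current id) by a run-skipping scan over
-- consecutive runs of equal ids (objective: alternative decomposition; same O(n) cost).
-- Pre_ excludes the empty list, on which A raises IndexError.


-- ===== PORT A =====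
-- literal port of A's for-loop over range(1, len(taskids)) with state (id, IDIndex)
def indexDataPoint (taskids : List Int) : List (Int × Int) :=
  match taskids with
  | [] => []   -- Python raises IndexError indexing its first element; excluded by Pre_
  | t0 :: _ =>
    ((PySem.List.pyRange 1 (taskids.length : Int) 1).foldl
      (fun (st : Int × List (Int × Int)) i =>
        let v := PySem.List.pyGetD taskids i 0
        if v ≠ st.1 then (v, st.2 ++ [(v, i)]) else st)
      (t0, [(t0, 0)])).2

-- ===== PORT B =====
-- inner 'while taskids[j] == taskids[i]' scan of Source B: length of the leading run
-- outer while loop of Source B: one step per run, skipping the rest of the run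
-- fuel = list length (each outer-loop step consumes at least one element), keeping the
-- recursion structural; the scan itself is Source B's run-skipping loop
def altGo : Nat → List Int → Int → List (Int × Int)
  | 0, _, _ => []
  | _ + 1, [], _ => []
  | fuel + 1, x :: xs, i =>
    (x, i) :: altGo fuel (xs.drop (xs.takeWhile (fun y => y == x)).length)
                         (i + 1 + ((xs.takeWhile (fun y => y == x)).length : Int))

def indexDataPoint_alt (taskids : List Int) : List (Int × Int) :=
  altGo taskids.length taskids 0

-- ===== PRECONDITION & SPEC =====
-- Pre_ excludes only the empty list, on which Python A raises IndexError indexing its first element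
def Pre_indexDataPoint (taskids : List Int) : Prop := taskids ≠ []
instance (taskids : List Int) : Decidable (Pre_indexDataPoint taskids) := by unfold Pre_indexDataPoint; infer_instance
def pvWitness_indexDataPoint : List Int := [1, 1, 2]


def Spec_indexDataPoint (taskids : List Int) (out : List (Int × Int)) : Prop := out = indexDataPoint_alt taskids
instance (taskids : List Int) (out : List (Int × Int)) : Decidable (Spec_indexDataPoint taskids out) := by unfold Spec_indexDataPoint; infer_instance

-- ===== CLAIM (what is proved, stated in full; the proofs are below) =====
def Claim_equal_indexDataPoint : Prop := ∀ (taskids : List Int), Dom_indexDataPoint taskids → Pre_indexDataPoint taskids → Spec_indexDataPoint taskids (indexDataPoint taskids)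

-- ===== LEMMAS AND PROOFS =====

-- reference recursion: what both loops compute on the tail, starting at index j with current id
def ref (id : Int) (j : Int) : List Int → List (Int × Int)
  | [] => []
  | x :: xs => if x ≠ id then (x, j) :: ref x (j + 1) xs else ref id (j + 1) xs

-- A's fold over range(j, n) equals acc ++ ref id j (drop j taskids)
lemma foldA (tids : List Int) :
    ∀ (rest : List Int) (j : Nat) (id : Int) (acc : List (Int × Int)),
      tids.drop j = rest →
      ((PySem.List.pyRange (j : Int) (tids.length : Int) 1).foldl
        (fun (st : Int × List (Int × Int)) i =>
          let v := PySem.List.pyGetD tids i 0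
          if v ≠ st.1 then (v, st.2 ++ [(v, i)]) else st)
        (id, acc)).2 = acc ++ ref id (j : Int) rest := by
  intro rest
  induction rest with
  | nil =>
    intro j id acc hdrop
    have hj : tids.length ≤ j := List.drop_eq_nil_iff.mp hdrop
    have : PySem.List.pyRange (j : Int) (tids.length : Int) 1 = [] := by
      simp [PySem.List.pyRange]; omega
    simp [this, ref]
  | cons x xs ih =>
    intro j id acc hdrop
    have hj : j < tids.length := by
      by_contra h
      rw [List.drop_eq_nil_iff.mpr (by omega)] at hdrop
      simp at hdrop
    have hget : tids.getD j 0 = x := by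
      have : tids.drop j = x :: xs := hdrop
      have hx : tids[j]? = some x := by
        rw [List.getElem?_eq_getElem hj]
        have := congrArg (fun l => l.head?) this
        simpa [List.head?_drop, List.getElem?_eq_getElem hj] using this
      simp [List.getD, hx]
    rw [PySem.List.pyRange_one_cons (by omega)]
    simp only [List.foldl_cons]
    have hdrop' : tids.drop (j + 1) = xs := by
      have := congrArg (fun l => l.drop 1) hdrop
      simpa [List.drop_drop, Nat.add_comm] using this
    have hpg : PySem.List.pyGetD tids (j : Int) 0 = x := by
      rw [PySem.List.pyGetD_natCast]; exact hget
    by_cases hx : x ≠ id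
    · simp only [hpg, if_pos hx]
      have := ih (j + 1) x (acc ++ [(x, (j : Int))]) hdrop'
      rw [show ((j : Int) + 1) = (((j + 1 : Nat)) : Int) by push_cast; ring] at *
      rw [this, ref]
      simp [hx]
    · simp only [hpg, if_neg hx]
      have := ih (j + 1) id acc hdrop'
      rw [show ((j : Int) + 1) = (((j + 1 : Nat)) : Int) by push_cast; ring] at *
      rw [this, ref]
      simp at hx
      simp [hx]

-- ref skips a run of elements equal to the current id
lemma ref_run (x : Int) : ∀ (w : List Int) (j : Int) (rest : List Int),
    (∀ a ∈ w, a = x) → ref x j (w ++ rest) = ref x (j + (w.length : Int)) rest := by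
  intro w
  induction w with
  | nil => intro j rest _; simp
  | cons a as ih =>
    intro j rest hall
    have ha : a = x := hall a (by simp)
    simp only [List.cons_append, ref, ha]
    rw [if_neg (by simp), ih (j + 1) rest (fun b hb => hall b (by simp [hb]))]
    congr 1
    simp
    ring

-- B's run-skipping recursion computes (x, i) :: ref x (i+1) xs
lemma altGo_eq : ∀ (n : Nat) (x : Int) (xs : List Int) (i : Int), xs.length < n →
    altGo n (x :: xs) i = (x, i) :: ref x (i + 1) xs := by
  intro n
  induction n with
  | zero =>
    intro x xs i h
    omega
  | succ n ih =>
    intro x xs i h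
    rw [altGo]
    congr 1
    have hsplit : xs.takeWhile (fun y => y == x) ++ xs.dropWhile (fun y => y == x) = xs :=
      List.takeWhile_append_dropWhile
    have hdropw : xs.drop (xs.takeWhile (fun y => y == x)).length = xs.dropWhile (fun y => y == x) := by
      nth_rewrite 2 [← hsplit]
      exact List.drop_left
    have hall : ∀ a ∈ xs.takeWhile (fun y => y == x), a = x := by
      intro a ha
      have := List.mem_takeWhile_imp ha
      simpa using this
    have hxs : ref x (i + 1) xs
        = ref x (i + 1 + ((xs.takeWhile (fun y => y == x)).length : Int)) (xs.dropWhile (fun y => y == x)) := by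
      conv_lhs => rw [← hsplit]
      exact ref_run x _ _ _ hall
    rw [hdropw, hxs]
    rcases hrest : xs.dropWhile (fun y => y == x) with _ | ⟨y, ys⟩
    · cases n <;> simp [altGo, ref]
    · have hy : y ≠ x := by
        have h2 := List.head_dropWhile_not (fun y => y == x) (l := xs) (by simp [hrest])
        simp_all
      have hlen : ys.length < n := by
        have h1 : (xs.dropWhile (fun y => y == x)).length ≤ xs.length := List.length_dropWhile_le _ _
        rw [hrest] at h1
        simp at h1
        omega
      rw [ih y ys _ hlen, ref, if_pos hy]

-- unfolding lemma for A on a nonempty list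
lemma indexDataPoint_cons (t0 : Int) (rest : List Int) :
    indexDataPoint (t0 :: rest)
      = ((PySem.List.pyRange 1 ((t0 :: rest).length : Int) 1).foldl
          (fun (st : Int × List (Int × Int)) i =>
            let v := PySem.List.pyGetD (t0 :: rest) i 0
            if v ≠ st.1 then (v, st.2 ++ [(v, i)]) else st)
          (t0, [(t0, 0)])).2 := rfl

-- ===== VERDICT (by name: the statement is the Claim_ definition above) =====
theorem indexDataPoint_spec : Claim_equal_indexDataPoint := by
  intro taskids _ hpre
  unfold Spec_indexDataPoint
  match taskids, hpre with
  | t0 :: rest, _ =>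
    have hA := foldA (t0 :: rest) rest 1 t0 [(t0, 0)] (by simp)
    rw [Nat.cast_one] at hA
    rw [indexDataPoint_cons, hA]
    show _ = altGo (t0 :: rest).length (t0 :: rest) 0
    rw [List.length_cons, altGo_eq rest.length.succ t0 rest 0 (Nat.lt_succ_self _)]
    simp
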